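-- pv_equiv track=rewrite | github.com/argriffing/xgcode | Monospace.py | get_codon_ruler_line
-- ===== SOURCE A (Python) =====
-- def _ruler_helper(label_offset_pairs, max_width, spacing_value):
--     """
--     @param label_offset_pairs: a list of (label_string, offset) pairs
--     @param max_width: the maximum length of the string
--     @param spacing_value: the string used to space the labels
--     @return: a string consisting of spaced labels
--     """
--     arr = []
--     current_width = 0
--     for i, (label, offset) in enumerate(label_offset_pairs):
--         # If writing this label would make the string exceed the maximum allowed width
--         # then we cannot write this label.
--         if offset + len(label) > max_width:
--             continue
--         # calculate the amount of spacing we need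
--         spacing_width = offset - current_width
--         # If there is not sufficient spacing
--         # then we cannot write this label.
--         if i > 0 and spacing_width < 1:
--             continue
--         # add the label to the string
--         s = (spacing_value * spacing_width) + label
--         arr.append(s)
--         current_width += len(s)
--     return ''.join(arr)
--
-- def get_codon_ruler_line(low, high):
--     """
--     Get a string that is a line of numbers.
--     @param low: the lower codon index
--     @param high: the upper codon index
--     @return: a string that marks the low index and high index in intervals of five where possible
--     """
--     if low > high:
--         raise ValueError('the lower bound should not exceed the upper bound')
--     ncodons = 1 + high - low
--     max_width = ncodons * 3
--     label_offset_pairs = []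
--     for codon_offset in range(ncodons):
--         offset = codon_offset * 3
--         tick = codon_offset + low
--         if tick == low or tick % 5 == 0:
--             label_offset_pairs.append((str(tick), offset))
--     spacer = ' '
--     return _ruler_helper(label_offset_pairs, max_width, spacer)
-- ===== SOURCE B (Python) =====
-- def get_codon_ruler_line(low, high):
--     """
--     Get a string that is a line of numbers.
--     @param low: the lower codon index
--     @param high: the upper codon index
--     @return: a string that marks the low index and high index in intervals of five where possible
--     """
--     if low > high:
--         raise ValueError('the lower bound should not exceed the upper bound')
--     ncodons = 1 + high - low
--     max_width = ncodons * 3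
--     # write labels directly into a fixed buffer of spaces
--     buf = [' '] * max_width
--     last_end = 0
--     for codon_offset in range(ncodons):
--         tick = codon_offset + low
--         if tick != low and tick % 5 != 0:
--             continue
--         offset = codon_offset * 3
--         label = str(tick)
--         if offset + len(label) > max_width:
--             continue
--         if codon_offset > 0 and offset - last_end < 1:
--             continue
--         buf[offset:offset + len(label)] = label
--         last_end = offset + len(label)
--     return ''.join(buf[:last_end])
-- ===== Notes on version B (the rewrite author's own statement) =====
-- stated objective: alternative
-- what changed: Replaces A's two passes (build a (label,offset) pair list, then a join helper that concatenates spacer runs and labels while tracking the enumerate index) by a single pass that writes each label in place into a fixed buffer of spaces and trims the buffer to the last write.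
import Mathlib
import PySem

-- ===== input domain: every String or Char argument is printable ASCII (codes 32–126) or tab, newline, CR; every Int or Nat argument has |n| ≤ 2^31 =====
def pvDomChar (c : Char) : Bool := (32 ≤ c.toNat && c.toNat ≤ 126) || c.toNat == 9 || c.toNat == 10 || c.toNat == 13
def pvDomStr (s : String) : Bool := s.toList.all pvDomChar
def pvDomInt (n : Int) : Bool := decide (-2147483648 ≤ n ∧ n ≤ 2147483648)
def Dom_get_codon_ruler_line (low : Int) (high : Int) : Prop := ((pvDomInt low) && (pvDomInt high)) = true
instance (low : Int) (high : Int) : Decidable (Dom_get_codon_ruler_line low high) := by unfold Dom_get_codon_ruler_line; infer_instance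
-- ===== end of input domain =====

-- B writes labels in place into a fixed buffer of spaces instead of A's pair list + join helper
-- (alternative decomposition, same cost); both Pythons raise when low > high, excluded by Pre_.

-- ===== PORT A =====
-- strings are ported as List Char (PySem.Chars operations); 'spacing_value * n' (str * int) is
-- ported as (List.replicate n.toNat spacing_value).flatten, exact incl. negative n -> empty.
def pvRulerHelper (label_offset_pairs : List (List Char × Int)) (max_width : Int)
    (spacing_value : List Char) : List Char :=
  let st := (PySem.List.enumerate label_offset_pairs 0).foldl
    (fun (st : List (List Char) × Int) ip =>
      if ip.2.2 + ((ip.2.1.length : Int)) > max_width then st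
      else
        let spacing_width := ip.2.2 - st.2
        if ip.1 > 0 ∧ spacing_width < 1 then st
        else
          let s := (List.replicate spacing_width.toNat spacing_value).flatten ++ ip.2.1
          (st.1 ++ [s], st.2 + (s.length : Int)))
    ([], 0)
  PySem.Chars.join [] st.1

def get_codon_ruler_line (low : Int) (high : Int) : String :=
  if low > high then ""  -- Python raises ValueError here; excluded by Pre_
  else
    let ncodons := 1 + high - low
    let max_width := ncodons * 3
    let label_offset_pairs := (PySem.List.pyRange 0 ncodons 1).foldl
      (fun ps codon_offset =>
        if codon_offset + low = low ∨ PySem.Int.mod (codon_offset + low) 5 = 0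
        then ps ++ [(PySem.Int.toChars (codon_offset + low), codon_offset * 3)]
        else ps) []
    String.mk (pvRulerHelper label_offset_pairs max_width [' '])

-- ===== PORT B =====
-- buf[offset:offset+len(label)] = label, ported as take/++/drop (exact: 0 ≤ offset and
-- offset + len(label) ≤ len(buf) hold whenever the write is reached).
def pvWriteAt (buf : List Char) (off : Nat) (label : List Char) : List Char :=
  buf.take off ++ label ++ buf.drop (off + label.length)

def get_codon_ruler_line_alt (low : Int) (high : Int) : String :=
  if low > high then ""  -- Python raises ValueError here; excluded by Pre_
  else
    let ncodons := 1 + high - low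
    let max_width := ncodons * 3
    let st := (PySem.List.pyRange 0 ncodons 1).foldl
      (fun (st : List Char × Int) codon_offset =>
        let tick := codon_offset + low
        if tick ≠ low ∧ PySem.Int.mod tick 5 ≠ 0 then st
        else
          let offset := codon_offset * 3
          let label := PySem.Int.toChars tick
          if offset + (label.length : Int) > max_width then st
          else if codon_offset > 0 ∧ offset - st.2 < 1 then st
          else (pvWriteAt st.1 offset.toNat label, offset + (label.length : Int)))
      (List.replicate max_width.toNat ' ', 0)
    String.mk (st.1.take st.2.toNat)

-- ===== PRECONDITION & SPEC =====
-- Pre_ excludes exactly low > high, where the Python A raises ValueError.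
def Pre_get_codon_ruler_line (low : Int) (high : Int) : Prop := low ≤ high
instance (low : Int) (high : Int) : Decidable (Pre_get_codon_ruler_line low high) := by
  unfold Pre_get_codon_ruler_line; infer_instance

def pvWitness_get_codon_ruler_line : Int × Int := (0, 9)

def Spec_get_codon_ruler_line (low : Int) (high : Int) (out : String) : Prop := out = get_codon_ruler_line_alt low high
instance (low : Int) (high : Int) (out : String) : Decidable (Spec_get_codon_ruler_line low high out) := by unfold Spec_get_codon_ruler_line; infer_instance

-- ===== CLAIM (what is proved, stated in full; the proofs are below) =====
def Claim_equal_get_codon_ruler_line : Prop := ∀ (low : Int) (high : Int), Dom_get_codon_ruler_line low high → Pre_get_codon_ruler_line low high → Spec_get_codon_ruler_line low high (get_codon_ruler_line low high)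

-- ===== LEMMAS AND PROOFS =====

-- named copies of the three loop bodies (definitionally equal to the lambdas in the ports)
def pvStepP (low : Int) (ps : List (List Char × Int)) (co : Int) : List (List Char × Int) :=
  if co + low = low ∨ PySem.Int.mod (co + low) 5 = 0
  then ps ++ [(PySem.Int.toChars (co + low), co * 3)] else ps

def pvStepH (mw : Int) (st : List (List Char) × Int) (ip : Int × (List Char × Int)) :
    List (List Char) × Int :=
  if ip.2.2 + ((ip.2.1.length : Int)) > mw then st
  else if ip.1 > 0 ∧ ip.2.2 - st.2 < 1 then st
  else
    let s := (List.replicate (ip.2.2 - st.2).toNat [' ']).flatten ++ ip.2.1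
    (st.1 ++ [s], st.2 + (s.length : Int))

def pvStepB (low : Int) (mw : Int) (st : List Char × Int) (co : Int) : List Char × Int :=
  if co + low ≠ low ∧ PySem.Int.mod (co + low) 5 ≠ 0 then st
  else if co * 3 + ((PySem.Int.toChars (co + low)).length : Int) > mw then st
  else if co > 0 ∧ co * 3 - st.2 < 1 then st
  else (pvWriteAt st.1 (co * 3).toNat (PySem.Int.toChars (co + low)),
        co * 3 + ((PySem.Int.toChars (co + low)).length : Int))

def pvPairs (low : Int) (n : Nat) : List (List Char × Int) :=
  (List.range n).foldl (fun ps (k : Nat) => pvStepP low ps (k : Int)) []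

def pvA (low : Int) (mw : Int) (n : Nat) : List (List Char) × Int :=
  (PySem.List.enumerate (pvPairs low n) 0).foldl (pvStepH mw) ([], 0)

def pvB (low : Int) (mw : Int) (n : Nat) : List Char × Int :=
  (List.range n).foldl (fun st (k : Nat) => pvStepB low mw st (k : Int))
    (List.replicate mw.toNat ' ', 0)

def pvInvariant (low : Int) (mw : Int) (n : Nat) : Prop :=
  (pvA low mw n).2 = (pvB low mw n).2 ∧
  0 ≤ (pvA low mw n).2 ∧ (pvA low mw n).2 ≤ mw ∧
  (((pvA low mw n).1.flatten.length : Int)) = (pvA low mw n).2 ∧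
  (pvB low mw n).1 = (pvA low mw n).1.flatten ++
      List.replicate (mw.toNat - (pvA low mw n).1.flatten.length) ' ' ∧
  (pvPairs low n = [] ↔ n = 0)

theorem pvJoinNil (l : List (List Char)) : PySem.Chars.join [] l = l.flatten := by
  induction l with
  | nil => rfl
  | cons a t ih =>
    cases t with
    | nil => simp [PySem.Chars.join, List.intercalate]
    | cons b t' =>
      simp only [PySem.Chars.join, List.intercalate, List.flatten] at *
      simp [ih]

theorem pvPairs_succ (low : Int) (n : Nat) :
    pvPairs low (n + 1) = pvStepP low (pvPairs low n) (n : Int) := by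
  simp [pvPairs, List.range_succ]

theorem pvB_succ (low mw : Int) (n : Nat) :
    pvB low mw (n + 1) = pvStepB low mw (pvB low mw n) (n : Int) := by
  simp [pvB, List.range_succ]

theorem pvA_succ_skip (low mw : Int) (n : Nat)
    (h : ¬ ((n : Int) + low = low ∨ PySem.Int.mod ((n : Int) + low) 5 = 0)) :
    pvA low mw (n + 1) = pvA low mw n := by
  simp only [pvA, pvPairs_succ]
  rw [pvStepP, if_neg h]

theorem pvA_succ_tick (low mw : Int) (n : Nat)
    (h : (n : Int) + low = low ∨ PySem.Int.mod ((n : Int) + low) 5 = 0) :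
    pvA low mw (n + 1) =
      pvStepH mw (pvA low mw n)
        ((0 : Int) + ((pvPairs low n).length : Int),
         (PySem.Int.toChars ((n : Int) + low), (n : Int) * 3)) := by
  rw [pvA, pvPairs_succ, pvStepP, if_pos h, PySem.List.enumerate_append]
  simp only [List.foldl_append, PySem.List.enumerate_cons, PySem.List.enumerate_nil,
    List.foldl_cons, List.foldl_nil]
  rfl

-- one in-place write into the all-space tail of the buffer
theorem pvWrite_eq (J label : List Char) (m off : Nat)
    (h1 : J.length ≤ off) (h2 : off + label.length ≤ J.length + m) :
    pvWriteAt (J ++ List.replicate m ' ') off label =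
      (J ++ (List.replicate (off - J.length) ' ' ++ label)) ++
        List.replicate (J.length + m - off - label.length) ' ' := by
  unfold pvWriteAt
  rw [List.take_append, List.drop_append, List.take_replicate, List.drop_replicate,
    List.take_of_length_le h1, List.drop_eq_nil_of_le (by omega)]
  have hmin : min (off - J.length) m = off - J.length := by omega
  have hcnt : m - (off + label.length - J.length) = J.length + m - off - label.length := by omega
  rw [hmin, hcnt]
  simp

theorem pvInv (low mw : Int) (h0 : 0 ≤ mw) (n : Nat) : pvInvariant low mw n := by
  induction n with
  | zero =>
    refine ⟨rfl, le_refl _, h0, rfl, ?_, by simp [pvPairs]⟩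
    simp [pvA, pvB, pvPairs]
  | succ n ih =>
    obtain ⟨h1, h2, h3, h4, h5, h6⟩ := ih
    by_cases hC : ((n : Int) + low = low ∨ PySem.Int.mod ((n : Int) + low) 5 = 0)
    · -- tick at codon offset n: A appends a pair, B reaches the write logic
      have hA := pvA_succ_tick low mw n hC
      have hB := pvB_succ low mw n
      have hP : pvPairs low (n + 1) = pvPairs low n ++
          [(PySem.Int.toChars ((n : Int) + low), (n : Int) * 3)] := by
        rw [pvPairs_succ, pvStepP, if_pos hC]
      have h6' : pvPairs low (n + 1) = [] ↔ n + 1 = 0 := by simp [hP]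
      have hg1 : ¬ ((n : Int) + low ≠ low ∧ PySem.Int.mod ((n : Int) + low) 5 ≠ 0) := by
        tauto
      rw [pvStepB, if_neg hg1] at hB
      set label := PySem.Int.toChars ((n : Int) + low) with hlab
      set off : Int := (n : Int) * 3 with hoff
      have hoffn : (0 : Int) ≤ off := by positivity
      by_cases hw : off + (label.length : Int) > mw
      · -- label does not fit: both skip
        rw [pvStepH, if_pos hw] at hA
        rw [if_pos hw] at hB
        exact ⟨by rw [hA, hB, h1], by rw [hA]; exact h2, by rw [hA]; exact h3,
          by rw [hA]; exact h4, by rw [hA, hB]; exact h5, h6'⟩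
      · have hi : ((0 : Int) + ((pvPairs low n).length : Int) > 0 ∧ off - (pvA low mw n).2 < 1)
            ↔ ((n : Int) > 0 ∧ off - (pvB low mw n).2 < 1) := by
          rw [h1]
          constructor
          · rintro ⟨ha, hb⟩
            refine ⟨?_, hb⟩
            have hne : pvPairs low n ≠ [] := by
              intro hnil; rw [hnil] at ha; simp at ha
            have : n ≠ 0 := fun h => hne (h6.mpr h)
            omega
          · rintro ⟨ha, hb⟩
            refine ⟨?_, hb⟩
            have hne0 : n ≠ 0 := by omega
            have hne : pvPairs low n ≠ [] := fun h => hne0 (h6.mp h)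
            have : 0 < (pvPairs low n).length := List.length_pos_of_ne_nil hne
            omega
        by_cases hs : ((n : Int) > 0 ∧ off - (pvB low mw n).2 < 1)
        · -- not enough spacing: both skip
          rw [pvStepH, if_neg hw, if_pos (hi.mpr hs)] at hA
          rw [if_neg hw, if_pos hs] at hB
          exact ⟨by rw [hA, hB, h1], by rw [hA]; exact h2, by rw [hA]; exact h3,
            by rw [hA]; exact h4, by rw [hA, hB]; exact h5, h6'⟩
        · -- write the label
          rw [pvStepH, if_neg hw, if_neg (fun h => hs (hi.mp h))] at hA
          rw [if_neg hw, if_neg hs] at hB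
          simp only [List.flatten_replicate_singleton] at hA
          set cw : Int := (pvA low mw n).2 with hcw
          have hsw : 0 ≤ off - cw := by
            by_cases hn : n = 0
            · have hA0 : pvA low mw 0 = ([], 0) := rfl
              subst hn
              rw [hcw, hA0, hoff]
              simp
            · have hpos : (0 : Int) < (n : Int) := by exact_mod_cast Nat.pos_of_ne_zero hn
              rcases not_and_or.mp hs with h | h
              · exact absurd hpos (by simpa using h)
              · omega
          have hfit : off + (label.length : Int) ≤ mw := by omega
          have hJlen : ((pvA low mw n).1.flatten.length : Int) = cw := h4
          have e1 : off.toNat - (pvA low mw n).1.flatten.length = (off - cw).toNat := by omega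
          have e2 : (pvA low mw n).1.flatten.length +
              (mw.toNat - (pvA low mw n).1.flatten.length) - off.toNat - label.length
              = mw.toNat - ((pvA low mw n).1.flatten.length + ((off - cw).toNat + label.length)) := by
            omega
          refine ⟨?_, ?_, ?_, ?_, ?_, h6'⟩
          · rw [hA, hB]
            simp only [List.length_append, List.length_replicate]
            push_cast
            omega
          · rw [hA]
            simp only [List.length_append, List.length_replicate]
            push_cast
            omega
          · rw [hA]
            simp only [List.length_append, List.length_replicate]
            push_cast
            omega
          · rw [hA]
            simp only [List.flatten_append, List.flatten_cons, List.flatten_nil,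
              List.append_nil, List.length_append, List.length_replicate]
            push_cast
            omega
          · rw [hA, hB, h5, pvWrite_eq _ _ _ _ (by omega) (by omega), e1, e2]
            simp [List.flatten_append, List.append_assoc]
    · -- no tick at codon offset n: both sides skip
      have hn0 : n ≠ 0 := by
        rintro rfl; exact hC (Or.inl (by simp))
      have hA := pvA_succ_skip low mw n hC
      have hP : pvPairs low (n + 1) = pvPairs low n := by
        rw [pvPairs_succ, pvStepP, if_neg hC]
      rw [not_or] at hC
      have hB : pvB low mw (n + 1) = pvB low mw n := by
        rw [pvB_succ, pvStepB, if_pos hC]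
      refine ⟨by rw [hA, hB, h1], by rw [hA]; exact h2, by rw [hA]; exact h3,
        by rw [hA]; exact h4, by rw [hA, hB]; exact h5, by simp [hP, h6, hn0]⟩

theorem pvHelper_eq (ps : List (List Char × Int)) (mw : Int) :
    pvRulerHelper ps mw [' '] =
      ((PySem.List.enumerate ps 0).foldl (pvStepH mw) ([], 0)).1.flatten := by
  rw [show pvRulerHelper ps mw [' '] =
      PySem.Chars.join [] ((PySem.List.enumerate ps 0).foldl (pvStepH mw) ([], 0)).1 from rfl,
    pvJoinNil]

theorem pvRange_cast (b : Int) :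
    PySem.List.pyRange 0 b 1 = (List.range b.toNat).map (fun k : Nat => (k : Int)) := by
  rw [PySem.List.pyRange_one, Int.sub_zero]
  exact List.map_congr_left (fun k _ => by simp)

theorem portA_eq (low high : Int) (h : ¬ low > high) :
    get_codon_ruler_line low high =
      String.mk (pvA low ((1 + high - low) * 3) (1 + high - low).toNat).1.flatten := by
  unfold get_codon_ruler_line
  rw [if_neg h]
  simp only [pvRange_cast, List.foldl_map]
  rw [pvHelper_eq]
  simp only [pvA, pvPairs, pvStepP]

theorem portB_eq (low high : Int) (h : ¬ low > high) :
    get_codon_ruler_line_alt low high =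
      String.mk ((pvB low ((1 + high - low) * 3) (1 + high - low).toNat).1.take
        (pvB low ((1 + high - low) * 3) (1 + high - low).toNat).2.toNat) := by
  unfold get_codon_ruler_line_alt
  rw [if_neg h]
  simp only [pvRange_cast, List.foldl_map]
  simp only [pvB, pvStepB]

-- ===== VERDICT (by name: the statement is the Claim_ definition above) =====
theorem get_codon_ruler_line_spec : Claim_equal_get_codon_ruler_line := by
  intro low high _ hpre
  unfold Spec_get_codon_ruler_line
  have h : ¬ low > high := not_lt.mpr hpre
  have h0 : (0 : Int) ≤ (1 + high - low) * 3 := by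
    unfold Pre_get_codon_ruler_line at hpre
    nlinarith
  obtain ⟨h1, h2, h3, h4, h5, h6⟩ :=
    pvInv low ((1 + high - low) * 3) h0 (1 + high - low).toNat
  rw [portA_eq low high h, portB_eq low high h, ← h1, h5]
  have e : (pvA low ((1 + high - low) * 3) (1 + high - low).toNat).2.toNat
      = (pvA low ((1 + high - low) * 3) (1 + high - low).toNat).1.flatten.length := by
    omega
  rw [e, List.take_left]
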